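-- pv_equiv track=rewrite | github.com/Titanmodne/3d-print-software | XYZ.py | remove_single_data_between_empty_lines
-- ===== SOURCE A (Python) =====
-- def remove_single_data_between_empty_lines(coordinates):
--     """
--     删除两个空行之间只有一条数据的情况。
--     """
--     cleaned_coordinates = []
--     buffer = []
--     for item in coordinates:
--         if item is None:
--             if len(buffer) == 1:
--                 buffer = []
--             else:
--                 cleaned_coordinates.extend(buffer)
--                 cleaned_coordinates.append(None)
--                 buffer = []
--         else:
--             buffer.append(item)
--     if len(buffer) > 1:
--         cleaned_coordinates.extend(buffer)
--     return cleaned_coordinates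
-- ===== SOURCE B (Python) =====
-- def remove_single_data_between_empty_lines(coordinates):
--     """Run-based rewrite: split into maximal None-runs / data-runs and emit per run.
--
--     A data-run of length 1 is dropped and swallows exactly one None from the
--     None-run that immediately follows it; every other run is emitted as-is.
--     """
--     result = []
--     i, n, swallow = 0, len(coordinates), False
--     while i < n:
--         j = i
--         if coordinates[i] is None:
--             while j < n and coordinates[j] is None:
--                 j += 1
--             k = (j - i) - (1 if swallow else 0)
--             result.extend([None] * k)
--             swallow = False
--         else:
--             while j < n and coordinates[j] is not None:
--                 j += 1
--             if j - i == 1: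
--                 swallow = True
--             else:
--                 result.extend(coordinates[i:j])
--                 swallow = False
--         i = j
--     return result
-- ===== Notes on version B (the rewrite author's own statement) =====
-- stated objective: alternative
-- what changed: Replaced A's element-wise buffer automaton with a run-based two-level scan: the list is split into maximal None-runs and data-runs, each run is emitted whole (data-runs of length 1 dropped, swallowing one None from the following None-run via a flag), instead of buffering items one by one.
import Mathlib
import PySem

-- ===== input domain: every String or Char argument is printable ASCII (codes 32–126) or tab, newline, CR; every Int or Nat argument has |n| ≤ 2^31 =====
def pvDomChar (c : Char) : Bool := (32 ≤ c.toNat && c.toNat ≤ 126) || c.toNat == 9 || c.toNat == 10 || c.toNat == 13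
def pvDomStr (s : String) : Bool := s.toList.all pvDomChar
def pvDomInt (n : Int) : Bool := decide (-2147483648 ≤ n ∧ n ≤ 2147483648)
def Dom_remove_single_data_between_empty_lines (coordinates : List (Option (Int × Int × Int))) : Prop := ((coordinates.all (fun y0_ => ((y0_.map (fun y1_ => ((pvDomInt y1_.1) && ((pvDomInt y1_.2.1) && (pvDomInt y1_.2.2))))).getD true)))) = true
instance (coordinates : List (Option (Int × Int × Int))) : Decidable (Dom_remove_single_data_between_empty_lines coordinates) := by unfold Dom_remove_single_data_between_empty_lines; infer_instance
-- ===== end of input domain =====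

-- B replaces A's element-wise buffer automaton by a run-based decomposition
-- (maximal None-runs / data-runs, with a 'swallow one None' flag); objective: alternative.

-- ===== PORT A =====
-- A's loop body: state is (cleaned_coordinates, buffer).
def aStep (st : List (Option (Int × Int × Int)) × List (Option (Int × Int × Int)))
    (item : Option (Int × Int × Int)) :
    List (Option (Int × Int × Int)) × List (Option (Int × Int × Int)) :=
  match item with
  | none => if st.2.length = 1 then (st.1, []) else (st.1 ++ st.2 ++ [none], [])
  | some v => (st.1, st.2 ++ [some v])

-- A's trailing `if len(buffer) > 1: cleaned_coordinates.extend(buffer)`.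
def aFinish (st : List (Option (Int × Int × Int)) × List (Option (Int × Int × Int))) :
    List (Option (Int × Int × Int)) :=
  if st.2.length > 1 then st.1 ++ st.2 else st.1

def remove_single_data_between_empty_lines (coordinates : List (Option (Int × Int × Int))) : List (Option (Int × Int × Int)) :=
  aFinish (coordinates.foldl aStep ([], []))

-- ===== PORT B =====
-- B's while-loop over maximal runs: each iteration consumes one whole run.
def rsdGo : Bool → List (Option (Int × Int × Int)) → List (Option (Int × Int × Int))
  | _, [] => []
  | swallow, none :: rest =>
      let m := 1 + (rest.takeWhile (fun x => x.isNone)).length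
      let k := if swallow then m - 1 else m
      List.replicate k none ++ rsdGo false (rest.dropWhile (fun x => x.isNone))
  | _, some v :: rest =>
      let run := some v :: rest.takeWhile (fun x => x.isSome)
      let rest' := rest.dropWhile (fun x => x.isSome)
      if run.length = 1 then rsdGo true rest' else run ++ rsdGo false rest'
termination_by _ xs => xs.length
decreasing_by
  all_goals exact Nat.lt_succ_of_le (List.Sublist.length_le (List.dropWhile_sublist _))

def remove_single_data_between_empty_lines_alt (coordinates : List (Option (Int × Int × Int))) : List (Option (Int × Int × Int)) :=
  rsdGo false coordinates

-- ===== PRECONDITION & SPEC =====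
def Spec_remove_single_data_between_empty_lines (coordinates : List (Option (Int × Int × Int))) (out : List (Option (Int × Int × Int))) : Prop := out = remove_single_data_between_empty_lines_alt coordinates
instance (coordinates : List (Option (Int × Int × Int))) (out : List (Option (Int × Int × Int))) : Decidable (Spec_remove_single_data_between_empty_lines coordinates out) := by unfold Spec_remove_single_data_between_empty_lines; infer_instance

-- ===== CLAIM (what is proved, stated in full; the proofs are below) =====
def Claim_equal_remove_single_data_between_empty_lines : Prop := ∀ (coordinates : List (Option (Int × Int × Int))), Dom_remove_single_data_between_empty_lines coordinates → Spec_remove_single_data_between_empty_lines coordinates (remove_single_data_between_empty_lines coordinates)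

-- ===== LEMMAS AND PROOFS =====

-- A's behaviour from an arbitrary mid-loop state, recursively ("aRun buffer rest").
def aRun (buffer : List (Option (Int × Int × Int))) : List (Option (Int × Int × Int)) → List (Option (Int × Int × Int))
  | [] => if buffer.length > 1 then buffer else []
  | none :: r => if buffer.length = 1 then aRun [] r else buffer ++ none :: aRun [] r
  | some v :: r => aRun (buffer ++ [some v]) r

lemma aRun_fold (xs : List (Option (Int × Int × Int))) :
    ∀ acc buffer, aFinish (xs.foldl aStep (acc, buffer)) = acc ++ aRun buffer xs := by
  induction xs with
  | nil =>
      intro acc buffer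
      simp only [List.foldl_nil, aRun, aFinish]
      split_ifs <;> simp
  | cons x r ih =>
      intro acc buffer
      cases x with
      | none =>
          by_cases h : buffer.length = 1
          · have hs : aStep (acc, buffer) none = (acc, []) := by simp [aStep, h]
            rw [List.foldl_cons, hs, ih, aRun, if_pos h]
          · have hs : aStep (acc, buffer) none = (acc ++ buffer ++ [none], []) := by
              simp [aStep, h]
            rw [List.foldl_cons, hs, ih, aRun, if_neg h]
            simp
      | some v =>
          have hs : aStep (acc, buffer) (some v) = (acc, buffer ++ [some v]) := by simp [aStep]
          rw [List.foldl_cons, hs, ih, aRun]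

-- takeWhile/dropWhile computation rules for the two predicates (all definitional)
lemma tw_nn (r : List (Option (Int × Int × Int))) :
    List.takeWhile (fun x => x.isNone) (none :: r) = none :: List.takeWhile (fun x => x.isNone) r := rfl
lemma dw_nn (r : List (Option (Int × Int × Int))) :
    List.dropWhile (fun x => x.isNone) (none :: r) = List.dropWhile (fun x => x.isNone) r := rfl
lemma tw_ns (v : Int × Int × Int) (r : List (Option (Int × Int × Int))) :
    List.takeWhile (fun x => x.isNone) (some v :: r) = [] := rfl
lemma dw_ns (v : Int × Int × Int) (r : List (Option (Int × Int × Int))) :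
    List.dropWhile (fun x => x.isNone) (some v :: r) = some v :: r := rfl
lemma tw_ss (v : Int × Int × Int) (r : List (Option (Int × Int × Int))) :
    List.takeWhile (fun x => x.isSome) (some v :: r) = some v :: List.takeWhile (fun x => x.isSome) r := rfl
lemma dw_ss (v : Int × Int × Int) (r : List (Option (Int × Int × Int))) :
    List.dropWhile (fun x => x.isSome) (some v :: r) = List.dropWhile (fun x => x.isSome) r := rfl
lemma tw_sn (r : List (Option (Int × Int × Int))) :
    List.takeWhile (fun x => x.isSome) (none :: r) = [] := rfl
lemma dw_sn (r : List (Option (Int × Int × Int))) :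
    List.dropWhile (fun x => x.isSome) (none :: r) = none :: r := rfl

-- unfolded forms of rsdGo on each head shape
lemma rsdGo_nil (b : Bool) : rsdGo b [] = [] := by rw [rsdGo]
lemma rsdGo_none (b : Bool) (r : List (Option (Int × Int × Int))) :
    rsdGo b (none :: r) =
      List.replicate (if b then (1 + (r.takeWhile (fun x => x.isNone)).length) - 1
                      else 1 + (r.takeWhile (fun x => x.isNone)).length) none ++
        rsdGo false (r.dropWhile (fun x => x.isNone)) := by
  rw [rsdGo]
lemma rsdGo_some (b : Bool) (v : Int × Int × Int) (r : List (Option (Int × Int × Int))) :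
    rsdGo b (some v :: r) =
      (if (some v :: r.takeWhile (fun x => x.isSome)).length = 1 then
        rsdGo true (r.dropWhile (fun x => x.isSome))
      else (some v :: r.takeWhile (fun x => x.isSome)) ++ rsdGo false (r.dropWhile (fun x => x.isSome))) := by
  rw [rsdGo]

lemma rep_one_add (k : Nat) :
    List.replicate (1 + k) (none : Option (Int × Int × Int)) = none :: List.replicate k none := by
  rw [Nat.add_comm, List.replicate_succ]

lemma aRun_buffer (xs : List (Option (Int × Int × Int))) :
    ∀ b, aRun b xs =
      aRun (b ++ xs.takeWhile (fun x => x.isSome)) (xs.dropWhile (fun x => x.isSome)) := by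
  induction xs with
  | nil => intro b; simp
  | cons x r ih =>
      intro b
      cases x with
      | none => rw [tw_sn, dw_sn, List.append_nil]
      | some v =>
          rw [tw_ss, dw_ss, aRun, ih (b ++ [some v]), List.append_assoc]
          rfl

lemma aRun_nones (xs : List (Option (Int × Int × Int))) :
    aRun [] xs =
      List.replicate (xs.takeWhile (fun x => x.isNone)).length none ++
        aRun [] (xs.dropWhile (fun x => x.isNone)) := by
  induction xs with
  | nil => simp
  | cons x r ih =>
      cases x with
      | none =>
          rw [tw_nn, dw_nn, List.length_cons, List.replicate_succ, aRun]
          simp only [List.length_nil]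
          rw [if_neg (by omega), List.nil_append, ih, List.cons_append]
      | some v => rw [tw_ns, dw_ns]; simp

lemma dropWhile_head_not {p : Option (Int × Int × Int) → Bool}
    (xs : List (Option (Int × Int × Int))) :
    (xs.dropWhile p = []) ∨
      (∃ y ys, xs.dropWhile p = y :: ys ∧ p y = false) := by
  induction xs with
  | nil => left; rfl
  | cons x r ih =>
      by_cases h : p x
      · simpa [h] using ih
      · right; exact ⟨x, r, by simp [h], by simpa using h⟩

lemma main_aux : ∀ n, ∀ xs : List (Option (Int × Int × Int)),
    xs.length ≤ n → rsdGo false xs = aRun [] xs := by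
  intro n
  induction n with
  | zero =>
      intro xs h
      have hx : xs = [] := List.eq_nil_of_length_eq_zero (Nat.le_zero.mp h)
      subst hx; rw [rsdGo_nil, aRun]; simp
  | succ n ih =>
      intro xs hlen
      match xs with
      | [] => rw [rsdGo_nil, aRun]; simp
      | none :: r =>
          rw [rsdGo_none, aRun_nones, tw_nn, dw_nn, if_neg (by simp)]
          have hr : (r.dropWhile (fun x => x.isNone)).length ≤ n := by
            have := List.Sublist.length_le (List.dropWhile_sublist (l := r) (fun x => x.isNone))
            simp only [List.length_cons] at hlen
            omega
          rw [ih _ hr, List.length_cons, Nat.add_comm]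
      | some v :: r =>
          rw [rsdGo_some, aRun_buffer, tw_ss, dw_ss, List.nil_append]
          have hdlen : (r.dropWhile (fun x => x.isSome)).length ≤ r.length :=
            List.Sublist.length_le (List.dropWhile_sublist _)
          have hrlen : r.length ≤ n := by
            simp only [List.length_cons] at hlen; omega
          by_cases h1 : (some v :: r.takeWhile (fun x => x.isSome)).length = 1
          · -- singleton data run: A drops it and swallows one following None
            have ht0 : r.takeWhile (fun x => x.isSome) = [] := by
              simp only [List.length_cons] at h1
              exact List.eq_nil_of_length_eq_zero (by omega)
            rw [if_pos h1, ht0]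
            rcases dropWhile_head_not (p := fun x => x.isSome) r with hnil | ⟨y, ys, hcons, hy⟩
            · rw [hnil, rsdGo_nil, aRun]
              simp
            · rw [hcons]
              have hyn : y = none := by
                cases y with
                | none => rfl
                | some _ => simp at hy
              subst hyn
              rw [aRun, if_pos (by simp), rsdGo_none, if_pos rfl, Nat.add_sub_cancel_left]
              have hys : (ys.dropWhile (fun x => x.isNone)).length ≤ n := by
                have h2 := List.Sublist.length_le (List.dropWhile_sublist (l := ys) (fun x => x.isNone))
                have h3 : (none :: ys).length ≤ r.length :=
                  List.Sublist.length_le (hcons ▸ List.dropWhile_sublist _)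
                simp only [List.length_cons] at h3
                omega
              rw [ih _ hys, aRun_nones (xs := ys)]
          · -- data run of length ≥ 2: emitted verbatim
            rw [if_neg h1]
            rcases dropWhile_head_not (p := fun x => x.isSome) r with hnil | ⟨y, ys, hcons, hy⟩
            · rw [hnil, rsdGo_nil, aRun]
              have hgt : (some v :: r.takeWhile (fun x => x.isSome)).length > 1 := by
                simp only [List.length_cons] at h1 ⊢; omega
              rw [if_pos hgt, List.append_nil]
            · rw [hcons]
              have hyn : y = none := by
                cases y with
                | none => rfl
                | some _ => simp at hy
              subst hyn
              rw [aRun, if_neg h1, rsdGo_none, if_neg (by simp)]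
              have hys : (ys.dropWhile (fun x => x.isNone)).length ≤ n := by
                have h2 := List.Sublist.length_le (List.dropWhile_sublist (l := ys) (fun x => x.isNone))
                have h3 : (none :: ys).length ≤ r.length :=
                  List.Sublist.length_le (hcons ▸ List.dropWhile_sublist _)
                simp only [List.length_cons] at h3
                omega
              rw [ih _ hys, aRun_nones (xs := ys), rep_one_add]
              simp

-- ===== VERDICT (by name: the statement is the Claim_ definition above) =====
theorem remove_single_data_between_empty_lines_spec : Claim_equal_remove_single_data_between_empty_lines := by
  intro coordinates _
  show remove_single_data_between_empty_lines coordinates = remove_single_data_between_empty_lines_alt coordinates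
  rw [remove_single_data_between_empty_lines_alt, main_aux coordinates.length coordinates le_rfl,
    remove_single_data_between_empty_lines, aRun_fold coordinates [] []]
  rfl
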